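-- pv_equiv track=rewrite | github.com/ivan4688/solverGPT | src/createfiles.py | _clean_python_code
-- ===== SOURCE A (Python) =====
-- def _clean_python_code(code: str) -> str:
--     """Очищает Python код от лишних пробелов и выравнивает отступы"""
--     lines = code.split('\n')
--     cleaned_lines = []
--
--     for line in lines:
--         stripped = line.rstrip()
--         if stripped:  # Не добавляем полностью пустые строки
--             cleaned_lines.append(stripped)
--         elif cleaned_lines and cleaned_lines[-1]:  # Добавляем только одну пустую строку между блоками
--             cleaned_lines.append('')
--
--     # Убираем множественные пустые строки в конце
--     while cleaned_lines and not cleaned_lines[-1]: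
--         cleaned_lines.pop()
--
--     return '\n'.join(cleaned_lines) + '\n'
-- ===== SOURCE B (Python) =====
-- from itertools import groupby
--
--
-- def _clean_python_code(code: str) -> str:
--     """Collapse blank-line runs via groupby instead of a look-back scan."""
--     lines = [line.rstrip() for line in code.split('\n')]
--     result = []
--     for is_blank, run in groupby(lines, key=lambda l: not l):
--         if is_blank:
--             result.append('')
--         else:
--             result.extend(run)
--     while result and result[0] == '':
--         result.pop(0)
--     while result and result[-1] == '':
--         result.pop()
--     return '\n'.join(result) + '\n'
-- ===== Notes on version B (the rewrite author's own statement) =====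
-- stated objective: idiomatic
-- what changed: Replaces A's single pass that inspects the last appended element (look-back state) with an itertools.groupby run-grouping pass: non-blank runs are extended into the output, each blank run contributes a single blank entry, and leading/trailing blank entries are popped afterwards.
import Mathlib
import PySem

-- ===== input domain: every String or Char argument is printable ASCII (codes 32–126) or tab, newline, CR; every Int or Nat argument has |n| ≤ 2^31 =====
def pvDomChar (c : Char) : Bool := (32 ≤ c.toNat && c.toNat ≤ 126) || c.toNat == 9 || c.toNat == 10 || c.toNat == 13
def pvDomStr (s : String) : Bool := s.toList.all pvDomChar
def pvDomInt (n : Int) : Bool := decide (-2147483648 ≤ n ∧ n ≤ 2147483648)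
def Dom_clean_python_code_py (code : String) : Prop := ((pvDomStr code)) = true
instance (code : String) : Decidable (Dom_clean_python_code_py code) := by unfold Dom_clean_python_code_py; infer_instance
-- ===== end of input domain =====

-- B collapses blank-line runs with a groupby-style run-grouping pass instead of A's
-- look-back-at-last-element scan; same output, stated objective: idiomatic.

-- ===== PORT A =====
-- the `while cleaned_lines and not cleaned_lines[-1]: cleaned_lines.pop()` loop of A
-- (B's trailing pop-while-blank loop is the identical loop)
def pvPopTrailing (r : List String) : List String :=
  if h : r ≠ [] ∧ PySem.List.pyGetD r (-1) "" = "" then pvPopTrailing r.dropLast else r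
termination_by r.length
decreasing_by
  have : 0 < r.length := List.length_pos_of_ne_nil h.1
  simp [List.length_dropLast]; omega

def clean_python_code_py (code : String) : String :=
  let lines := (PySem.Str.split? code "\n").getD []   -- sep "\n" ≠ "": split? never raises here
  let cleaned := lines.foldl (fun acc line =>
    let stripped := PySem.Str.rstrip line
    if stripped ≠ "" then acc ++ [stripped]
    else if acc ≠ [] ∧ PySem.List.pyGetD acc (-1) "" ≠ "" then acc ++ [""]
    else acc) []
  PySem.Str.join "\n" (pvPopTrailing cleaned) ++ "\n"

-- ===== PORT B =====
-- itertools.groupby over the rstripped lines, keyed by blankness: each group is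
-- (is_blank, the run of consecutive lines with that blankness)
def pvGroupRuns : List String → List (Bool × List String)
  | [] => []
  | l :: ls =>
    (l == "", l :: ls.takeWhile (fun x => (x == "") == (l == ""))) ::
      pvGroupRuns (ls.dropWhile (fun x => (x == "") == (l == "")))
termination_by xs => xs.length
decreasing_by
  have := List.length_dropWhile_le (fun x => (x == "") == (l == "")) ls
  simp; omega

-- B's leading pop-while-blank loop
def pvPopLeading : List String → List String
  | [] => []
  | x :: xs => if x == "" then pvPopLeading xs else x :: xs

def clean_python_code_py_alt (code : String) : String :=
  let lines := ((PySem.Str.split? code "\n").getD []).map PySem.Str.rstrip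
  let result := (pvGroupRuns lines).foldl
    (fun r kg => if kg.1 then r ++ [""] else r ++ kg.2) []
  PySem.Str.join "\n" (pvPopTrailing (pvPopLeading result)) ++ "\n"

-- ===== PRECONDITION & SPEC =====
def Spec_clean_python_code_py (code : String) (out : String) : Prop := out = clean_python_code_py_alt code
instance (code : String) (out : String) : Decidable (Spec_clean_python_code_py code out) := by unfold Spec_clean_python_code_py; infer_instance

-- ===== CLAIM (what is proved, stated in full; the proofs are below) =====
def Claim_equal_clean_python_code_py : Prop := ∀ (code : String), Dom_clean_python_code_py code → Spec_clean_python_code_py code (clean_python_code_py code)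

-- ===== LEMMAS AND PROOFS =====

-- canonical form: pvG b ls = the collapsed line list of ls, where b = true means
-- "no blank may be emitted here" (nothing emitted yet, or the last emitted line is blank)
def pvG : Bool → List String → List String
  | _, [] => []
  | b, l :: ls =>
    if l = "" then (if b then pvG true ls else "" :: pvG true ls)
    else l :: pvG false ls

-- A's loop computes pvG of the rstripped lines
theorem foldA_eq_pvG (ls : List String) : ∀ (acc : List String),
    ls.foldl (fun acc line =>
      if PySem.Str.rstrip line ≠ "" then acc ++ [PySem.Str.rstrip line]
      else if acc ≠ [] ∧ PySem.List.pyGetD acc (-1) "" ≠ "" then acc ++ [""]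
      else acc) acc
    = acc ++ pvG (acc.isEmpty || (PySem.List.pyGetD acc (-1) "" == "")) (ls.map PySem.Str.rstrip) := by
  induction ls with
  | nil => intro acc; simp [pvG]
  | cons l ls ih =>
    intro acc
    by_cases hl : PySem.Str.rstrip l = ""
    · by_cases hc : acc ≠ [] ∧ PySem.List.pyGetD acc (-1) "" ≠ ""
      · have hb : (acc.isEmpty || (PySem.List.pyGetD acc (-1) "" == "")) = false := by
          simp [hc.1, hc.2]
        simp only [List.map_cons, List.foldl_cons, if_neg (not_not_intro hl), if_pos hc, ih,
          hb, pvG, if_pos hl]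
        simp [PySem.List.pyGetD_neg_one_append_singleton]
      · have hb : (acc.isEmpty || (PySem.List.pyGetD acc (-1) "" == "")) = true := by
          rcases not_and_or.mp hc with h | h
          · simp [not_not.mp h]
          · simp [not_not.mp h]
        simp only [List.map_cons, List.foldl_cons, if_neg (not_not_intro hl), if_neg hc, ih, hb,
          pvG, if_pos hl]
        simp
    · simp only [List.map_cons, List.foldl_cons, if_pos hl, ih, pvG, if_neg hl]
      have h1 : ((acc ++ [PySem.Str.rstrip l]).isEmpty
          || (PySem.Str.rstrip l == "")) = false := by simp [hl]
      rw [PySem.List.pyGetD_neg_one_append_singleton, h1]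
      simp

-- blank prefixes are skipped in state true
theorem pvG_true_blanks (run rest : List String) (h : ∀ x ∈ run, x = "") :
    pvG true (run ++ rest) = pvG true rest := by
  induction run with
  | nil => rfl
  | cons x t ih =>
    have hx : x = "" := h x (by simp)
    simp only [List.cons_append, pvG, if_pos hx]
    exact ih (fun y hy => h y (by simp [hy]))

-- non-blank prefixes are copied in state false
theorem pvG_false_nonblanks (run rest : List String) (h : ∀ x ∈ run, x ≠ "") :
    pvG false (run ++ rest) = run ++ pvG false rest := by
  induction run with
  | nil => rfl
  | cons x t ih =>
    have hx : x ≠ "" := h x (by simp)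
    simp only [List.cons_append, pvG, if_neg hx]
    rw [ih (fun y hy => h y (by simp [hy]))]

-- the two states agree when the next line is non-blank (or the list ends)
theorem pvG_true_eq_false (rest : List String) (h : ∀ x ∈ rest.head?, x ≠ "") :
    pvG true rest = pvG false rest := by
  cases rest with
  | nil => rfl
  | cons x t =>
    have hx : x ≠ "" := h x (by simp)
    simp [pvG, hx]

-- B's groupby loop computes pvG false
theorem flat_groupRuns (ls : List String) :
    (pvGroupRuns ls).foldl (fun r kg => if kg.1 then r ++ [""] else r ++ kg.2) []
      = pvG false ls := by
  have hstep : (fun (r : List String) (kg : Bool × List String) =>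
      if kg.1 then r ++ [""] else r ++ kg.2)
      = fun r kg => r ++ (if kg.1 then [""] else kg.2) := by
    funext r kg; split <;> rfl
  rw [hstep, PySem.List.foldl_append_eq_flatMap]
  simp only [List.nil_append]
  induction ls using pvGroupRuns.induct with
  | case1 => simp [pvGroupRuns, pvG]
  | case2 l ls ih =>
    rw [pvGroupRuns, List.flatMap_cons, ih]
    by_cases hl : l = ""
    · subst hl
      simp only [beq_self_eq_true, beq_true] at *
      have htake : ∀ x ∈ ls.takeWhile (fun x => x == ""), x = "" := by
        intro x hx
        have := List.mem_takeWhile_imp hx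
        simpa using this
      have hdrop : ∀ x ∈ (ls.dropWhile (fun x => x == "")).head?, x ≠ "" := by
        intro x hx
        have hh := List.head?_dropWhile_not (fun x => x == "") ls
        cases he : (ls.dropWhile (fun x => x == "")).head? with
        | none => rw [he] at hx; simp at hx
        | some y =>
          rw [he] at hx hh; simp at hx hh
          subst hx; simpa using hh
      conv_rhs => rw [show pvG false ("" :: ls) = "" :: pvG true ls by simp [pvG],
        ← List.takeWhile_append_dropWhile (p := fun x => x == "") (l := ls),
        pvG_true_blanks _ _ htake, pvG_true_eq_false _ hdrop]
      simp
    · have hkf : (l == "") = false := by simp [hl]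
      simp only [hkf, beq_false, Bool.false_eq_true, if_false] at *
      have htake : ∀ x ∈ ls.takeWhile (fun x => !(x == "")), x ≠ "" := by
        intro x hx
        have := List.mem_takeWhile_imp hx
        simpa using this
      conv_rhs => rw [show pvG false (l :: ls) = l :: pvG false ls by simp [pvG, hl],
        ← List.takeWhile_append_dropWhile (p := fun x => !(x == "")) (l := ls),
        pvG_false_nonblanks _ _ htake]
      simp

-- pvG true never starts with a blank, so pop-leading fixes it …
theorem popLeading_pvG_true (ls : List String) :
    pvPopLeading (pvG true ls) = pvG true ls := by
  induction ls with
  | nil => rfl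
  | cons l t ih =>
    by_cases hl : l = ""
    · simp only [pvG, if_pos hl]; exact ih
    · simp [pvG, hl, pvPopLeading]

-- … and turns pvG false into pvG true
theorem popLeading_pvG_false (ls : List String) :
    pvPopLeading (pvG false ls) = pvG true ls := by
  cases ls with
  | nil => rfl
  | cons l t =>
    by_cases hl : l = ""
    · subst hl
      simp only [pvG, Bool.false_eq_true, if_false]
      simp only [pvPopLeading, beq_self_eq_true, if_true]
      exact popLeading_pvG_true t
    · simp [pvG, hl, pvPopLeading]

-- ===== VERDICT (by name: the statement is the Claim_ definition above) =====
theorem clean_python_code_py_spec : Claim_equal_clean_python_code_py := by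
  intro code _
  unfold Spec_clean_python_code_py clean_python_code_py clean_python_code_py_alt
  simp only
  rw [flat_groupRuns, popLeading_pvG_false, foldA_eq_pvG]
  simp
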